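-- pv_equiv track=rewrite | github.com/runchal/betterocr | ocr_engine/src/engines/easyocr_engine.py | _convert_bbox_format
-- ===== SOURCE A (Python) =====
-- from typing import Dict, Optional, List, Tuple
--
-- def _convert_bbox_format(bbox_points: List) -> Tuple[int, int, int, int]:
--     """Convert EasyOCR bbox format to (x, y, w, h)"""
--     if len(bbox_points) == 4:
--         # Four corner points
--         xs = [p[0] for p in bbox_points]
--         ys = [p[1] for p in bbox_points]
--         x_min, x_max = min(xs), max(xs)
--         y_min, y_max = min(ys), max(ys)
--         return (int(x_min), int(y_min), int(x_max - x_min), int(y_max - y_min))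
--     return (0, 0, 0, 0)
-- ===== SOURCE B (Python) =====
-- def _convert_bbox_format(bbox_points):
--     """Convert EasyOCR bbox format to (x, y, w, h)"""
--     if len(bbox_points) != 4:
--         return (0, 0, 0, 0)
--     xs = sorted(p[0] for p in bbox_points)
--     ys = sorted(p[1] for p in bbox_points)
--     return (int(xs[0]), int(ys[0]), int(xs[-1] - xs[0]), int(ys[-1] - ys[0]))
-- ===== Notes on version B (the rewrite author's own statement) =====
-- stated objective: alternative
-- what changed: Instead of A's four separate min/max scans over two comprehension lists, B sorts the x-coordinates and the y-coordinates once and reads the extrema off the first and last elements of each sorted list.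
import Mathlib
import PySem

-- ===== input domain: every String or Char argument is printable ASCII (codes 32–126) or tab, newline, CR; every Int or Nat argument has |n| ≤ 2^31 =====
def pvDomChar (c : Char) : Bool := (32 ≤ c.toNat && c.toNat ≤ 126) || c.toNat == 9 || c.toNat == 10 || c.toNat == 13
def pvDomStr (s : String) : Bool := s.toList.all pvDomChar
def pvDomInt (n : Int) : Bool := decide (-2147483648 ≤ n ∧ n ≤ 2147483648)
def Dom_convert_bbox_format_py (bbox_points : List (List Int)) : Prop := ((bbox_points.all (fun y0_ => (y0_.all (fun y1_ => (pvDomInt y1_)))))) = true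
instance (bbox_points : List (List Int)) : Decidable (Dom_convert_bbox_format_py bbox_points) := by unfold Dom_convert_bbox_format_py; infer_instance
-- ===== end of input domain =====

-- B replaces A's four min/max scans over two comprehension lists with sort-then-index:
-- sort the x's and the y's once and read the extrema off the ends (objective: alternative).

-- ===== PORT A =====
def convert_bbox_format_py (bbox_points : List (List Int)) : Int × Int × Int × Int :=
  if bbox_points.length = 4 then
    let xs := bbox_points.map (fun p => (PySem.List.pyGet? p 0).getD 0)
    let ys := bbox_points.map (fun p => (PySem.List.pyGet? p 1).getD 0)
    let x_min := (PySem.List.min? xs (fun v => v)).getD 0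
    let x_max := (PySem.List.max? xs (fun v => v)).getD 0
    let y_min := (PySem.List.min? ys (fun v => v)).getD 0
    let y_max := (PySem.List.max? ys (fun v => v)).getD 0
    (x_min, y_min, x_max - x_min, y_max - y_min)
  else (0, 0, 0, 0)

-- ===== PORT B =====
def convert_bbox_format_py_alt (bbox_points : List (List Int)) : Int × Int × Int × Int :=
  if bbox_points.length ≠ 4 then (0, 0, 0, 0)
  else
    let xs := PySem.List.sorted (bbox_points.map (fun p => (PySem.List.pyGet? p 0).getD 0)) (fun v => v)
    let ys := PySem.List.sorted (bbox_points.map (fun p => (PySem.List.pyGet? p 1).getD 0)) (fun v => v)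
    let x0 := (PySem.List.pyGet? xs 0).getD 0
    let y0 := (PySem.List.pyGet? ys 0).getD 0
    let xl := (PySem.List.pyGet? xs (-1)).getD 0
    let yl := (PySem.List.pyGet? ys (-1)).getD 0
    (x0, y0, xl - x0, yl - y0)

-- ===== PRECONDITION & SPEC =====
-- Pre_ excludes exactly the inputs on which A raises IndexError: a 4-point list containing
-- a point with fewer than 2 coordinates.
def Pre_convert_bbox_format_py (bbox_points : List (List Int)) : Prop :=
  bbox_points.length = 4 → ∀ p ∈ bbox_points, 2 ≤ p.length
instance (bbox_points : List (List Int)) : Decidable (Pre_convert_bbox_format_py bbox_points) := by unfold Pre_convert_bbox_format_py; infer_instance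
def pvWitness_convert_bbox_format_py : List (List Int) := [[0, 0], [4, 0], [4, 3], [0, 3]]
def Spec_convert_bbox_format_py (bbox_points : List (List Int)) (out : Int × Int × Int × Int) : Prop := out = convert_bbox_format_py_alt bbox_points
instance (bbox_points : List (List Int)) (out : Int × Int × Int × Int) : Decidable (Spec_convert_bbox_format_py bbox_points out) := by unfold Spec_convert_bbox_format_py; infer_instance

-- ===== CLAIM (what is proved, stated in full; the proofs are below) =====
def Claim_equal_convert_bbox_format_py : Prop := ∀ (bbox_points : List (List Int)), Dom_convert_bbox_format_py bbox_points → Pre_convert_bbox_format_py bbox_points → Spec_convert_bbox_format_py bbox_points (convert_bbox_format_py bbox_points)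

-- ===== LEMMAS AND PROOFS =====
-- first element of the sorted list = min of the list (A's min? value)
theorem pvSortedMin (x : Int) (t : List Int) :
    (PySem.List.pyGet? (PySem.List.sorted (x :: t) (fun v => v)) 0).getD 0 = t.foldl min x := by
  obtain ⟨m, u, hs⟩ : ∃ m u, PySem.List.sorted (x :: t) (fun v => v) = m :: u := by
    cases h : PySem.List.sorted (x :: t) (fun v => v) with
    | nil => exact absurd ((PySem.List.sorted_eq_nil_iff _ _ _).mp h) (by simp)
    | cons m u => exact ⟨m, u, rfl⟩
  have hmin := PySem.List.min?_id_cons x t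
  have h1 : m ≤ t.foldl min x :=
    PySem.List.key_head_sorted_le _ _ hs _ (PySem.List.min?_mem hmin)
  have h2 : t.foldl min x ≤ m := by
    refine PySem.List.min?_isMin hmin m ?_
    exact (PySem.List.sorted_perm (x :: t) (fun v => v) false).mem_iff.mp (by rw [hs]; simp)
  rw [hs, PySem.List.pyGet?_zero_cons]
  simp only [Option.getD_some]
  omega

-- last element of the sorted list = max of the list (A's max? value)
theorem pvSortedMax (x : Int) (t : List Int) :
    (PySem.List.pyGet? (PySem.List.sorted (x :: t) (fun v => v)) (-1)).getD 0 = t.foldl max x := by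
  have hperm := PySem.List.sorted_perm (x :: t) (fun v => v) false
  have hlen : (PySem.List.sorted (x :: t) (fun v => v)).length = t.length + 1 := by
    rw [PySem.List.length_sorted]; simp
  have hmax := PySem.List.max?_id_cons x t
  have hlt : (PySem.List.sorted (x :: t) (fun v => v)).length - 1
      < (PySem.List.sorted (x :: t) (fun v => v)).length := by omega
  have hlast : PySem.List.pyGet? (PySem.List.sorted (x :: t) (fun v => v)) (-1)
      = some (PySem.List.sorted (x :: t) (fun v => v))[(PySem.List.sorted (x :: t) (fun v => v)).length - 1] := by
    rw [PySem.List.pyGet?_neg_one, List.getLast?_eq_getElem?, List.getElem?_eq_getElem hlt]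
  have hmem : (PySem.List.sorted (x :: t) (fun v => v))[(PySem.List.sorted (x :: t) (fun v => v)).length - 1] ∈ (x :: t) :=
    hperm.mem_iff.mp (List.getElem_mem _)
  have h1 : (PySem.List.sorted (x :: t) (fun v => v))[(PySem.List.sorted (x :: t) (fun v => v)).length - 1] ≤ t.foldl max x :=
    PySem.List.max?_isMax hmax _ hmem
  have h2 : t.foldl max x ≤ (PySem.List.sorted (x :: t) (fun v => v))[(PySem.List.sorted (x :: t) (fun v => v)).length - 1] := by
    obtain ⟨p, hp, hpe⟩ := List.mem_iff_getElem.mp (hperm.mem_iff.mpr (PySem.List.max?_mem hmax))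
    calc t.foldl max x = (PySem.List.sorted (x :: t) (fun v => v))[p] := hpe.symm
      _ ≤ (PySem.List.sorted (x :: t) (fun v => v))[(PySem.List.sorted (x :: t) (fun v => v)).length - 1] :=
          PySem.List.sorted_id_getElem_mono _ (by omega) hlt
  rw [hlast]
  simp only [Option.getD_some]
  omega

-- ===== VERDICT (by name: the statement is the Claim_ definition above) =====
theorem convert_bbox_format_py_spec : Claim_equal_convert_bbox_format_py := by
  intro l _ _
  unfold Spec_convert_bbox_format_py
  match l with
  | [] => simp [convert_bbox_format_py, convert_bbox_format_py_alt]
  | [_] => simp [convert_bbox_format_py, convert_bbox_format_py_alt]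
  | [_, _] => simp [convert_bbox_format_py, convert_bbox_format_py_alt]
  | [_, _, _] => simp [convert_bbox_format_py, convert_bbox_format_py_alt]
  | _ :: _ :: _ :: _ :: _ :: _ => simp [convert_bbox_format_py, convert_bbox_format_py_alt]
  | [a, b, c, d] =>
    simp only [convert_bbox_format_py, convert_bbox_format_py_alt, List.length_cons,
      List.length_nil, List.map, ne_eq, not_true_eq_false, reduceIte]
    rw [PySem.List.min?_id_cons, PySem.List.max?_id_cons, PySem.List.min?_id_cons,
      PySem.List.max?_id_cons, pvSortedMin, pvSortedMax, pvSortedMin, pvSortedMax]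
    simp
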